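-- pv_equiv track=rewrite | github.com/pcorliss/advent_of_code | 2024/12/daily.py | sides
-- ===== SOURCE A (Python) =====
-- def sides(grid, block):
--   sum = 0
--
--   min_x = min([x for x, _ in block])
--   max_x = max([x for x, _ in block])
--   min_y = min([y for _, y in block])
--   max_y = max([y for _, y in block])
--
--   # read from left to right
--   # if there's a block and not a block above then there's a side
--   # side_check on, if side_check off, add one to side
--   # if not a block then side_check off
--   # new line reset side_check
--   for y in range(min_y, max_y + 1):
--     up_side_check = False
--     down_side_check = False
--     for x in range(min_x, max_x + 1):
--       if (x, y) in block and (x, y - 1) not in block: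
--           if not up_side_check:
--             up_side_check = True
--             sum += 1
--       else:
--         up_side_check = False
--
--       if (x, y) in block and (x, y + 1) not in block:
--           if not down_side_check:
--             down_side_check = True
--             sum += 1
--       else:
--         down_side_check = False
--
--   # Do the same but left and right
--   for x in range(min_x, max_x + 1):
--     right_side_check = False
--     left_side_check = False
--     for y in range(min_y, max_y + 1):
--       if (x, y) in block and (x + 1, y) not in block:
--           if not right_side_check:
--             right_side_check = True
--             sum += 1
--       else:
--         right_side_check = False
--
--       if (x, y) in block and (x - 1, y) not in block:
--           if not left_side_check:
--             left_side_check = True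
--             sum += 1
--       else:
--         left_side_check = False
--
--   return sum
-- ===== SOURCE B (Python) =====
-- def sides(grid, block):
--     s = set(block)
--     total = 0
--     for (x, y) in s:
--         # a side = a maximal run of boundary edges; count each run at its start
--         if (x, y - 1) not in s and not ((x - 1, y) in s and (x - 1, y - 1) not in s):
--             total += 1  # start of a top side
--         if (x, y + 1) not in s and not ((x - 1, y) in s and (x - 1, y + 1) not in s):
--             total += 1  # start of a bottom side
--         if (x - 1, y) not in s and not ((x, y - 1) in s and (x - 1, y - 1) not in s):
--             total += 1  # start of a left side
--         if (x + 1, y) not in s and not ((x, y - 1) in s and (x + 1, y - 1) not in s):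
--             total += 1  # start of a right side
--     return total
-- ===== Notes on version B (the rewrite author's own statement) =====
-- stated objective: faster
-- what changed: A sweeps every row and column of the region's bounding box with running side-check flags; B builds a set of the cells once and counts, per cell, the four side-run starts (corner counting), linear in the number of cells.
import Mathlib
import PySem

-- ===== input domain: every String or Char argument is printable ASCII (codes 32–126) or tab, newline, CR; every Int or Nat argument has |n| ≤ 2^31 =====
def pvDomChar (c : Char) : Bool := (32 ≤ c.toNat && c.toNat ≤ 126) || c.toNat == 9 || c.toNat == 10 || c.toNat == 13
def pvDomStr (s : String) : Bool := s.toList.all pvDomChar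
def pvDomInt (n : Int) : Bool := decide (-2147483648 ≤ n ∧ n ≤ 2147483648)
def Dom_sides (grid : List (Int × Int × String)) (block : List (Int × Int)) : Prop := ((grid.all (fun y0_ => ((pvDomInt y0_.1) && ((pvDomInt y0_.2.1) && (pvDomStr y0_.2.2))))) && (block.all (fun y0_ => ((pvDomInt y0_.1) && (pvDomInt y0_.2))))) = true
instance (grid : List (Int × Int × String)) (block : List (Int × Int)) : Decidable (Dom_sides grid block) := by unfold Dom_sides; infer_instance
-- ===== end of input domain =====

-- B replaces A's O(W·H) bounding-box sweeps by an O(k) corner/run-start count over the region's cells (a set built once); equivalence is proved for nonempty block (A raises ValueError on an empty block).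

-- ===== PORT A =====
-- the inner scan loop of A (two side-check flags and the running sum), shared verbatim by A's two double loops
def pvStep (E1 E2 : Int → Bool) (st : Bool × Bool × Int) (x : Int) : Bool × Bool × Int :=
  let st1 : Bool × Bool × Int :=
    if E1 x then (true, st.2.1, if st.1 then st.2.2 else st.2.2 + 1)
    else (false, st.2.1, st.2.2)
  if E2 x then (st1.1, true, if st1.2.1 then st1.2.2 else st1.2.2 + 1)
  else (st1.1, false, st1.2.2)

def pvScan (E1 E2 : Int → Bool) (xs : List Int) (acc : Int) : Int :=
  (xs.foldl (pvStep E1 E2) (false, false, acc)).2.2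

def sides (grid : List (Int × Int × String)) (block : List (Int × Int)) : Int :=
  match PySem.List.min? (block.map (fun p => p.1)) (fun v => v),
        PySem.List.max? (block.map (fun p => p.1)) (fun v => v),
        PySem.List.min? (block.map (fun p => p.2)) (fun v => v),
        PySem.List.max? (block.map (fun p => p.2)) (fun v => v) with
  | some minX, some maxX, some minY, some maxY =>
      let rows := (PySem.List.pyRange minY (maxY + 1) 1).foldl (fun acc y =>
        pvScan (fun x => decide ((x, y) ∈ block) && !decide ((x, y - 1) ∈ block))
               (fun x => decide ((x, y) ∈ block) && !decide ((x, y + 1) ∈ block))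
               (PySem.List.pyRange minX (maxX + 1) 1) acc) 0
      (PySem.List.pyRange minX (maxX + 1) 1).foldl (fun acc x =>
        pvScan (fun y => decide ((x, y) ∈ block) && !decide ((x + 1, y) ∈ block))
               (fun y => decide ((x, y) ∈ block) && !decide ((x - 1, y) ∈ block))
               (PySem.List.pyRange minY (maxY + 1) 1) acc) rows
  | _, _, _, _ => 0   -- unreachable under Pre_sides: Python's min([]) raises ValueError

-- ===== PORT B =====
def sides_alt (grid : List (Int × Int × String)) (block : List (Int × Int)) : Int :=
  let s := PySem.Set.ofList block
  s.foldl (fun tot p =>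
    let tot := if !decide ((p.1, p.2 - 1) ∈ s) && !(decide ((p.1 - 1, p.2) ∈ s) && !decide ((p.1 - 1, p.2 - 1) ∈ s)) then tot + 1 else tot
    let tot := if !decide ((p.1, p.2 + 1) ∈ s) && !(decide ((p.1 - 1, p.2) ∈ s) && !decide ((p.1 - 1, p.2 + 1) ∈ s)) then tot + 1 else tot
    let tot := if !decide ((p.1 - 1, p.2) ∈ s) && !(decide ((p.1, p.2 - 1) ∈ s) && !decide ((p.1 - 1, p.2 - 1) ∈ s)) then tot + 1 else tot
    if !decide ((p.1 + 1, p.2) ∈ s) && !(decide ((p.1, p.2 - 1) ∈ s) && !decide ((p.1 + 1, p.2 - 1) ∈ s)) then tot + 1 else tot) 0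

-- ===== PRECONDITION & SPEC =====
-- Pre_ excludes only the empty block, on which Python's min([...]) raises ValueError.
def Pre_sides (grid : List (Int × Int × String)) (block : List (Int × Int)) : Prop := block ≠ []
instance (grid : List (Int × Int × String)) (block : List (Int × Int)) : Decidable (Pre_sides grid block) := by unfold Pre_sides; infer_instance
def pvWitness_sides : (List (Int × Int × String)) × (List (Int × Int)) := ([], [(0, 0), (1, 0)])

def Spec_sides (grid : List (Int × Int × String)) (block : List (Int × Int)) (out : Int) : Prop := out = sides_alt grid block
instance (grid : List (Int × Int × String)) (block : List (Int × Int)) (out : Int) : Decidable (Spec_sides grid block out) := by unfold Spec_sides; infer_instance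

-- ===== CLAIM (what is proved, stated in full; the proofs are below) =====
def Claim_equal_sides : Prop := ∀ (grid : List (Int × Int × String)) (block : List (Int × Int)), Dom_sides grid block → Pre_sides grid block → Spec_sides grid block (sides grid block)

-- ===== LEMMAS AND PROOFS =====

-- "x starts a side" for the 1-dimensional edge predicate E: an edge here, none just before
def pvStart (E : Int → Bool) (x : Int) : Bool := E x && !E (x - 1)

-- the four per-cell run-start predicates, as predicates on a cell of the plane
def pvTop (block : List (Int × Int)) (p : Int × Int) : Bool :=
  decide (p ∈ block) && !decide ((p.1, p.2 - 1) ∈ block) && !(decide ((p.1 - 1, p.2) ∈ block) && !decide ((p.1 - 1, p.2 - 1) ∈ block))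
def pvBot (block : List (Int × Int)) (p : Int × Int) : Bool :=
  decide (p ∈ block) && !decide ((p.1, p.2 + 1) ∈ block) && !(decide ((p.1 - 1, p.2) ∈ block) && !decide ((p.1 - 1, p.2 + 1) ∈ block))
def pvRight (block : List (Int × Int)) (p : Int × Int) : Bool :=
  decide (p ∈ block) && !decide ((p.1 + 1, p.2) ∈ block) && !(decide ((p.1, p.2 - 1) ∈ block) && !decide ((p.1 + 1, p.2 - 1) ∈ block))
def pvLeft (block : List (Int × Int)) (p : Int × Int) : Bool :=
  decide (p ∈ block) && !decide ((p.1 - 1, p.2) ∈ block) && !(decide ((p.1, p.2 - 1) ∈ block) && !decide ((p.1 - 1, p.2 - 1) ∈ block))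

lemma pvStep_eval (E1 E2 : Int → Bool) (acc : Int) (a : Int) :
    pvStep E1 E2 (E1 (a - 1), E2 (a - 1), acc) a
      = (E1 a, E2 a, acc + (if pvStart E1 a then 1 else 0) + (if pvStart E2 a then 1 else 0)) := by
  simp only [pvStep, pvStart]
  by_cases h1 : E1 a <;> by_cases h2 : E2 a <;>
    by_cases h3 : E1 (a - 1) <;> by_cases h4 : E2 (a - 1) <;>
      simp [h1, h2, h3, h4]

lemma scan_core (E1 E2 : Int → Bool) (n : Nat) : ∀ (a acc : Int),
    ((PySem.List.pyRange a (a + n) 1).foldl (pvStep E1 E2) (E1 (a - 1), E2 (a - 1), acc)).2.2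
      = acc + ((PySem.List.pyRange a (a + n) 1).countP (pvStart E1) : Int)
            + ((PySem.List.pyRange a (a + n) 1).countP (pvStart E2) : Int) := by
  induction n with
  | zero =>
      intro a acc
      rw [show a + ((0 : Nat) : Int) = a by push_cast; ring,
          PySem.List.pyRange_one_eq_nil (le_refl a)]
      simp
  | succ n ih =>
      intro a acc
      have hlt : a < a + ((n + 1 : Nat) : Int) := by push_cast; omega
      rw [PySem.List.pyRange_one_cons hlt]
      have hsh : a + ((n + 1 : Nat) : Int) = (a + 1) + (n : Int) := by push_cast; ring
      rw [hsh]
      have h1 : E1 a = E1 ((a + 1) - 1) := by norm_num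
      have h2 : E2 a = E2 ((a + 1) - 1) := by norm_num
      simp only [List.foldl_cons, pvStep_eval, List.countP_cons]
      rw [h1, h2, ih (a + 1) (acc + (if pvStart E1 a then 1 else 0) + (if pvStart E2 a then 1 else 0))]
      by_cases s1 : pvStart E1 a <;> by_cases s2 : pvStart E2 a <;>
        simp [s1, s2] <;> push_cast <;> ring

lemma scan_count (E1 E2 : Int → Bool) (a b acc : Int)
    (h1 : E1 (a - 1) = false) (h2 : E2 (a - 1) = false) :
    pvScan E1 E2 (PySem.List.pyRange a b 1) acc
      = acc + ((PySem.List.pyRange a b 1).countP (pvStart E1) : Int)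
            + ((PySem.List.pyRange a b 1).countP (pvStart E2) : Int) := by
  unfold pvScan
  rcases le_or_gt b a with hba | hab
  · rw [PySem.List.pyRange_one_eq_nil hba]; simp
  · have hb : b = a + ((b - a).toNat : Int) := by omega
    rw [hb, show ((false, false, acc) : Bool × Bool × Int) = (E1 (a - 1), E2 (a - 1), acc) by
      rw [h1, h2], scan_core]

-- B's fold with four conditional increments is the sum of four counts
lemma fold4 (c1 c2 c3 c4 : Int × Int → Bool) (l : List (Int × Int)) : ∀ (t : Int),
    l.foldl (fun tot p =>
      let tot := if c1 p then tot + 1 else tot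
      let tot := if c2 p then tot + 1 else tot
      let tot := if c3 p then tot + 1 else tot
      if c4 p then tot + 1 else tot) t
    = t + (l.countP c1 : Int) + (l.countP c2 : Int) + (l.countP c3 : Int) + (l.countP c4 : Int) := by
  induction l with
  | nil => intro t; simp
  | cons p l ih =>
      intro t
      simp only [List.foldl_cons, List.countP_cons]
      rw [ih]
      by_cases h1 : c1 p <;> by_cases h2 : c2 p <;> by_cases h3 : c3 p <;> by_cases h4 : c4 p <;>
        simp [h1, h2, h3, h4] <;> push_cast <;> ring

-- counting over two duplicate-free lists that agree in membership wherever P holds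
lemma countP_eq_of_nodup (P : Int × Int → Bool) (l1 l2 : List (Int × Int))
    (h1 : l1.Nodup) (h2 : l2.Nodup) (h : ∀ p, P p = true → (p ∈ l1 ↔ p ∈ l2)) :
    l1.countP P = l2.countP P := by
  rw [List.countP_eq_length_filter, List.countP_eq_length_filter]
  refine List.Perm.length_eq ?_
  rw [List.perm_ext_iff_of_nodup (h1.filter P) (h2.filter P)]
  intro p
  simp only [List.mem_filter]
  constructor
  · rintro ⟨hm, hp⟩; exact ⟨(h p hp).1 hm, hp⟩
  · rintro ⟨hm, hp⟩; exact ⟨(h p hp).2 hm, hp⟩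

def pvPairs (mk : Int → Int → Int × Int) (as bs : List Int) : List (Int × Int) :=
  as.flatMap (fun a => bs.map (fun b => mk a b))

lemma mem_pvPairs (mk : Int → Int → Int × Int)
    (as bs : List Int) (p : Int × Int) :
    p ∈ pvPairs mk as bs ↔ ∃ a ∈ as, ∃ b ∈ bs, p = mk a b := by
  simp only [pvPairs, List.mem_flatMap, List.mem_map]
  constructor
  · rintro ⟨a, ha, b, hb, rfl⟩; exact ⟨a, ha, b, hb, rfl⟩
  · rintro ⟨a, ha, b, hb, rfl⟩; exact ⟨a, ha, b, hb, rfl⟩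

lemma nodup_pvPairs (mk : Int → Int → Int × Int)
    (hinj : ∀ a b a' b', mk a b = mk a' b' → a = a' ∧ b = b')
    (as bs : List Int) (ha : as.Nodup) (hb : bs.Nodup) :
    (pvPairs mk as bs).Nodup := by
  induction as with
  | nil => simp [pvPairs]
  | cons a as ih =>
      rw [List.nodup_cons] at ha
      simp only [pvPairs, List.flatMap_cons]
      rw [List.nodup_append]
      refine ⟨hb.map (fun b b' hbb => (hinj a b a b' hbb).2), ih ha.2, ?_⟩
      intro p hp q hq
      obtain ⟨b, _, rfl⟩ := List.mem_map.1 hp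
      obtain ⟨a', ha', hb'⟩ := List.mem_flatMap.1 hq
      obtain ⟨b', _, rfl⟩ := List.mem_map.1 hb'
      intro he
      exact ha.1 ((hinj a b a' b' he).1 ▸ ha')

lemma countP_pvPairs (mk : Int → Int → Int × Int) (P : Int × Int → Bool) (as bs : List Int) :
    (pvPairs mk as bs).countP P = (as.map (fun a => bs.countP (fun b => P (mk a b)))).sum := by
  induction as with
  | nil => simp [pvPairs]
  | cons a as ih =>
      simp only [pvPairs, List.flatMap_cons, List.countP_append, List.map_cons, List.sum_cons] at *
      rw [ih, List.countP_map]
      rfl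

-- pointwise-equal predicates on the members of a list count equally
lemma countP_congr_mem (l : List (Int × Int)) (P Q : Int × Int → Bool)
    (h : ∀ p ∈ l, P p = Q p) : l.countP P = l.countP Q := by
  induction l with
  | nil => simp
  | cons p l ih =>
      simp only [List.countP_cons, h p (List.mem_cons_self ..),
        ih (fun q hq => h q (List.mem_cons_of_mem _ hq))]

lemma sum_map_natcast (f : Int → Nat) (l : List Int) :
    (l.map (fun y => (f y : Int))).sum = ((l.map f).sum : Int) := by
  induction l with
  | nil => simp
  | cons y l ih => simp [ih]

lemma sum_map_add_int' (f g : Int → Int) (l : List Int) :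
    (l.map (fun y => f y + g y)).sum = (l.map f).sum + (l.map g).sum := by
  induction l with
  | nil => simp
  | cons y l ih => simp [ih]; ring

-- ===== VERDICT (by name: the statement is the Claim_ definition above) =====
theorem sides_spec : Claim_equal_sides := by
  intro grid block _ hpre
  show sides grid block = sides_alt grid block
  -- the four extrema exist because block is nonempty
  rcases h1 : PySem.List.min? (block.map (fun p => p.1)) (fun v => v) with _ | minX
  · rw [PySem.List.min?_eq_none_iff, List.map_eq_nil_iff] at h1; exact absurd h1 hpre
  rcases h2 : PySem.List.max? (block.map (fun p => p.1)) (fun v => v) with _ | maxX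
  · rw [PySem.List.max?_eq_none_iff, List.map_eq_nil_iff] at h2; exact absurd h2 hpre
  rcases h3 : PySem.List.min? (block.map (fun p => p.2)) (fun v => v) with _ | minY
  · rw [PySem.List.min?_eq_none_iff, List.map_eq_nil_iff] at h3; exact absurd h3 hpre
  rcases h4 : PySem.List.max? (block.map (fun p => p.2)) (fun v => v) with _ | maxY
  · rw [PySem.List.max?_eq_none_iff, List.map_eq_nil_iff] at h4; exact absurd h4 hpre
  -- bounds of the members
  have bx1 : ∀ p ∈ block, minX ≤ p.1 := fun p hp =>
    PySem.List.min?_isMin h1 p.1 (List.mem_map_of_mem hp)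
  have bx2 : ∀ p ∈ block, p.1 ≤ maxX := fun p hp =>
    PySem.List.max?_isMax h2 p.1 (List.mem_map_of_mem hp)
  have by1 : ∀ p ∈ block, minY ≤ p.2 := fun p hp =>
    PySem.List.min?_isMin h3 p.2 (List.mem_map_of_mem hp)
  have by2 : ∀ p ∈ block, p.2 ≤ maxY := fun p hp =>
    PySem.List.max?_isMax h4 p.2 (List.mem_map_of_mem hp)
  -- ROW SWEEP of A: each row contributes its top-start and bottom-start counts
  have hrow : ∀ (acc : Int) (y : Int),
      pvScan (fun x => decide ((x, y) ∈ block) && !decide ((x, y - 1) ∈ block))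
             (fun x => decide ((x, y) ∈ block) && !decide ((x, y + 1) ∈ block))
             (PySem.List.pyRange minX (maxX + 1) 1) acc
      = acc + (((PySem.List.pyRange minX (maxX + 1) 1).countP
                  (fun x => pvTop block (x, y)) : Int)
             + ((PySem.List.pyRange minX (maxX + 1) 1).countP
                  (fun x => pvBot block (x, y)) : Int)) := by
    intro acc y
    have hout : ∀ b : Int, ((minX - 1 : Int), b) ∉ block := by
      intro b hmem
      have h := bx1 _ hmem
      simp only at h
      omega
    rw [scan_count _ _ _ _ _ (by simp [hout y]) (by simp [hout y])]
    have e1 : pvStart (fun x => decide ((x, y) ∈ block) && !decide ((x, y - 1) ∈ block))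
        = fun x => pvTop block (x, y) := by
      funext x; simp [pvStart, pvTop]
    have e2 : pvStart (fun x => decide ((x, y) ∈ block) && !decide ((x, y + 1) ∈ block))
        = fun x => pvBot block (x, y) := by
      funext x; simp [pvStart, pvBot]
    rw [e1, e2]; ring
  -- COLUMN SWEEP of A
  have hcol : ∀ (acc : Int) (x : Int),
      pvScan (fun y => decide ((x, y) ∈ block) && !decide ((x + 1, y) ∈ block))
             (fun y => decide ((x, y) ∈ block) && !decide ((x - 1, y) ∈ block))
             (PySem.List.pyRange minY (maxY + 1) 1) acc
      = acc + (((PySem.List.pyRange minY (maxY + 1) 1).countP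
                  (fun y => pvRight block (x, y)) : Int)
             + ((PySem.List.pyRange minY (maxY + 1) 1).countP
                  (fun y => pvLeft block (x, y)) : Int)) := by
    intro acc x
    have hout : ∀ a : Int, (a, (minY - 1 : Int)) ∉ block := by
      intro a hmem
      have h := by1 _ hmem
      simp only at h
      omega
    rw [scan_count _ _ _ _ _ (by simp [hout x]) (by simp [hout x])]
    have e1 : pvStart (fun y => decide ((x, y) ∈ block) && !decide ((x + 1, y) ∈ block))
        = fun y => pvRight block (x, y) := by
      funext y; simp [pvStart, pvRight]
    have e2 : pvStart (fun y => decide ((x, y) ∈ block) && !decide ((x - 1, y) ∈ block))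
        = fun y => pvLeft block (x, y) := by
      funext y; simp [pvStart, pvLeft]
    rw [e1, e2]; ring
  -- count of a run-start predicate over the bounding box = its count over the set of cells
  have hbox : ∀ (mk : Int → Int → Int × Int)
      (hinj : ∀ a b a' b', mk a b = mk a' b' → a = a' ∧ b = b')
      (as bs : List Int) (hna : as.Nodup) (hnb : bs.Nodup)
      (P : Int × Int → Bool)
      (hPmem : ∀ p, P p = true → p ∈ block)
      (hcov : ∀ p ∈ block, ∃ a ∈ as, ∃ b ∈ bs, p = mk a b),
      (pvPairs mk as bs).countP P = (PySem.Set.ofList block).countP P := by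
    intro mk hinj as bs hna hnb P hPmem hcov
    refine countP_eq_of_nodup P _ _ (nodup_pvPairs mk hinj as bs hna hnb)
      (PySem.Set.nodup_ofList block) ?_
    intro p hP
    rw [mem_pvPairs, PySem.Set.mem_ofList]
    have hpb := hPmem p hP
    exact ⟨fun _ => hpb, fun _ => hcov p hpb⟩
  -- evaluate A
  simp only [sides, h1, h2, h3, h4]
  rw [PySem.List.foldl_congr_mem _ _
        (fun acc y => acc + (((PySem.List.pyRange minX (maxX + 1) 1).countP
            (fun x => pvTop block (x, y)) : Int)
          + ((PySem.List.pyRange minX (maxX + 1) 1).countP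
            (fun x => pvBot block (x, y)) : Int))) 0
        (fun acc y _ => hrow acc y),
      PySem.List.foldl_add]
  rw [PySem.List.foldl_congr_mem _ _
        (fun acc x => acc + (((PySem.List.pyRange minY (maxY + 1) 1).countP
            (fun y => pvRight block (x, y)) : Int)
          + ((PySem.List.pyRange minY (maxY + 1) 1).countP
            (fun y => pvLeft block (x, y)) : Int))) _
        (fun acc x _ => hcol acc x),
      PySem.List.foldl_add]
  rw [sum_map_add_int', sum_map_add_int',
      sum_map_natcast, sum_map_natcast, sum_map_natcast, sum_map_natcast]
  -- turn each double count into a count over pvPairs, then over the cell set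
  rw [show (PySem.List.pyRange minY (maxY + 1) 1).map
        (fun y => (PySem.List.pyRange minX (maxX + 1) 1).countP (fun x => pvTop block (x, y)))
      = (PySem.List.pyRange minY (maxY + 1) 1).map
        (fun a => (PySem.List.pyRange minX (maxX + 1) 1).countP (fun b => pvTop block ((fun a b => (b, a)) a b))) from rfl,
      ← countP_pvPairs]
  rw [show (PySem.List.pyRange minY (maxY + 1) 1).map
        (fun y => (PySem.List.pyRange minX (maxX + 1) 1).countP (fun x => pvBot block (x, y)))
      = (PySem.List.pyRange minY (maxY + 1) 1).map
        (fun a => (PySem.List.pyRange minX (maxX + 1) 1).countP (fun b => pvBot block ((fun a b => (b, a)) a b))) from rfl,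
      ← countP_pvPairs]
  rw [show (PySem.List.pyRange minX (maxX + 1) 1).map
        (fun x => (PySem.List.pyRange minY (maxY + 1) 1).countP (fun y => pvRight block (x, y)))
      = (PySem.List.pyRange minX (maxX + 1) 1).map
        (fun a => (PySem.List.pyRange minY (maxY + 1) 1).countP (fun b => pvRight block ((fun a b => (a, b)) a b))) from rfl,
      ← countP_pvPairs]
  rw [show (PySem.List.pyRange minX (maxX + 1) 1).map
        (fun x => (PySem.List.pyRange minY (maxY + 1) 1).countP (fun y => pvLeft block (x, y)))
      = (PySem.List.pyRange minX (maxX + 1) 1).map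
        (fun a => (PySem.List.pyRange minY (maxY + 1) 1).countP (fun b => pvLeft block ((fun a b => (a, b)) a b))) from rfl,
      ← countP_pvPairs]
  have hswapinj : ∀ (a b a' b' : Int), ((fun a b => ((b, a) : Int × Int)) a b) = ((fun a b => (b, a)) a' b') → a = a' ∧ b = b' := by
    intro a b a' b' h; simp at h; exact ⟨h.2, h.1⟩
  have hmkinj : ∀ (a b a' b' : Int), ((fun a b => ((a, b) : Int × Int)) a b) = ((fun a b => (a, b)) a' b') → a = a' ∧ b = b' := by
    intro a b a' b' h; simp at h; exact ⟨h.1, h.2⟩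
  have hcovRow : ∀ p ∈ block, ∃ a ∈ PySem.List.pyRange minY (maxY + 1) 1,
      ∃ b ∈ PySem.List.pyRange minX (maxX + 1) 1, p = (fun a b => ((b, a) : Int × Int)) a b := by
    intro p hp
    refine ⟨p.2, ?_, p.1, ?_, rfl⟩
    · rw [PySem.List.mem_pyRange_one]; exact ⟨by1 p hp, by have := by2 p hp; omega⟩
    · rw [PySem.List.mem_pyRange_one]; exact ⟨bx1 p hp, by have := bx2 p hp; omega⟩
  have hcovCol : ∀ p ∈ block, ∃ a ∈ PySem.List.pyRange minX (maxX + 1) 1,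
      ∃ b ∈ PySem.List.pyRange minY (maxY + 1) 1, p = (fun a b => ((a, b) : Int × Int)) a b := by
    intro p hp
    refine ⟨p.1, ?_, p.2, ?_, rfl⟩
    · rw [PySem.List.mem_pyRange_one]; exact ⟨bx1 p hp, by have := bx2 p hp; omega⟩
    · rw [PySem.List.mem_pyRange_one]; exact ⟨by1 p hp, by have := by2 p hp; omega⟩
  rw [hbox _ hswapinj _ _ (PySem.List.nodup_pyRange_one _ _) (PySem.List.nodup_pyRange_one _ _)
        (pvTop block) (fun p hP => by simp [pvTop] at hP; exact hP.1.1) hcovRow,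
      hbox _ hswapinj _ _ (PySem.List.nodup_pyRange_one _ _) (PySem.List.nodup_pyRange_one _ _)
        (pvBot block) (fun p hP => by simp [pvBot] at hP; exact hP.1.1) hcovRow,
      hbox _ hmkinj _ _ (PySem.List.nodup_pyRange_one _ _) (PySem.List.nodup_pyRange_one _ _)
        (pvRight block) (fun p hP => by simp [pvRight] at hP; exact hP.1.1) hcovCol,
      hbox _ hmkinj _ _ (PySem.List.nodup_pyRange_one _ _) (PySem.List.nodup_pyRange_one _ _)
        (pvLeft block) (fun p hP => by simp [pvLeft] at hP; exact hP.1.1) hcovCol]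
  -- evaluate B
  have hB := fold4
    (fun p => !decide ((p.1, p.2 - 1) ∈ PySem.Set.ofList block) && !(decide ((p.1 - 1, p.2) ∈ PySem.Set.ofList block) && !decide ((p.1 - 1, p.2 - 1) ∈ PySem.Set.ofList block)))
    (fun p => !decide ((p.1, p.2 + 1) ∈ PySem.Set.ofList block) && !(decide ((p.1 - 1, p.2) ∈ PySem.Set.ofList block) && !decide ((p.1 - 1, p.2 + 1) ∈ PySem.Set.ofList block)))
    (fun p => !decide ((p.1 - 1, p.2) ∈ PySem.Set.ofList block) && !(decide ((p.1, p.2 - 1) ∈ PySem.Set.ofList block) && !decide ((p.1 - 1, p.2 - 1) ∈ PySem.Set.ofList block)))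
    (fun p => !decide ((p.1 + 1, p.2) ∈ PySem.Set.ofList block) && !(decide ((p.1, p.2 - 1) ∈ PySem.Set.ofList block) && !decide ((p.1 + 1, p.2 - 1) ∈ PySem.Set.ofList block)))
    (PySem.Set.ofList block) 0
  have hBdef : sides_alt grid block = _ := hB
  rw [hBdef]
  -- on the members of the set the four B-conditions are the four run-start predicates
  have hmemEq : ∀ (q : Int × Int), decide (q ∈ PySem.Set.ofList block) = decide (q ∈ block) := by
    intro q
    by_cases hq : q ∈ block
    · simp [hq, (PySem.Set.mem_ofList block q).2 hq]
    · simp [hq, fun h => hq ((PySem.Set.mem_ofList block q).1 h)]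
  have hcong : ∀ (c : Int × Int → Bool) (Q : Int × Int → Bool),
      (∀ p ∈ block, c p = Q p) →
      (PySem.Set.ofList block).countP c = (PySem.Set.ofList block).countP Q := by
    intro c Q h
    exact countP_congr_mem _ c Q (fun p hp => h p ((PySem.Set.mem_ofList block p).1 hp))
  have hc1 : (PySem.Set.ofList block).countP
      (fun p => !decide ((p.1, p.2 - 1) ∈ PySem.Set.ofList block) && !(decide ((p.1 - 1, p.2) ∈ PySem.Set.ofList block) && !decide ((p.1 - 1, p.2 - 1) ∈ PySem.Set.ofList block)))
      = (PySem.Set.ofList block).countP (pvTop block) :=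
    hcong _ _ (fun p hpb => by obtain ⟨a, b⟩ := p; simp [pvTop, hmemEq, hpb])
  have hc2 : (PySem.Set.ofList block).countP
      (fun p => !decide ((p.1, p.2 + 1) ∈ PySem.Set.ofList block) && !(decide ((p.1 - 1, p.2) ∈ PySem.Set.ofList block) && !decide ((p.1 - 1, p.2 + 1) ∈ PySem.Set.ofList block)))
      = (PySem.Set.ofList block).countP (pvBot block) :=
    hcong _ _ (fun p hpb => by obtain ⟨a, b⟩ := p; simp [pvBot, hmemEq, hpb])
  have hc3 : (PySem.Set.ofList block).countP
      (fun p => !decide ((p.1 - 1, p.2) ∈ PySem.Set.ofList block) && !(decide ((p.1, p.2 - 1) ∈ PySem.Set.ofList block) && !decide ((p.1 - 1, p.2 - 1) ∈ PySem.Set.ofList block)))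
      = (PySem.Set.ofList block).countP (pvLeft block) :=
    hcong _ _ (fun p hpb => by obtain ⟨a, b⟩ := p; simp [pvLeft, hmemEq, hpb])
  have hc4 : (PySem.Set.ofList block).countP
      (fun p => !decide ((p.1 + 1, p.2) ∈ PySem.Set.ofList block) && !(decide ((p.1, p.2 - 1) ∈ PySem.Set.ofList block) && !decide ((p.1 + 1, p.2 - 1) ∈ PySem.Set.ofList block)))
      = (PySem.Set.ofList block).countP (pvRight block) :=
    hcong _ _ (fun p hpb => by obtain ⟨a, b⟩ := p; simp [pvRight, hmemEq, hpb])
  rw [hc1, hc2, hc3, hc4]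
  ring
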